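-- pv_equiv track=rewrite | github.com/nhorto/HolisticBravo-RecipeBlog | content/recipes/generate_chia_csv.py | build_csv_row
-- ===== SOURCE A (Python) =====
-- CSV_HEADER = [
--     "Name",
--     "Slug",
--     "Created Date",
--     "Updated Date",
--     "Short Description",
--     "Introduction",
--     "Why You'll Love This",
--     "Tips",
--     "Ingredients Overview",
--     "Instructions Overview",
--     "FAQ",
--     "Related Recipes",
--     "Author",
--     "Prep Time",
--     "Cook Time",
--     "Total Time",
--     "Servings",
--     "Calories",
--     "Diet",
--     "Category",
--     "Cuisine",
--     "Recipe Card Ingredients",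
--     "Recipe Card Instructions",
--     "Nutrition",
--     "Source URL",
-- ]
--
-- FIELD_MAP = {
--     "title": "Name",
--     "slug": "Slug",
--     "createdDate": "Created Date",
--     "updatedDate": "Updated Date",
--     "shortDescription": "Short Description",
--     "introduction": "Introduction",
--     "whyYoullLove": "Why You'll Love This",
--     "tips": "Tips",
--     "ingredientsOverview": "Ingredients Overview",
--     "instructionsOverview": "Instructions Overview",
--     "faq": "FAQ",
--     "relatedRecipes": "Related Recipes",
--     "author": "Author",
--     "prepTime": "Prep Time",
--     "cookTime": "Cook Time",
--     "totalTime": "Total Time",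
--     "servings": "Servings",
--     "calories": "Calories",
--     "diet": "Diet",
--     "category": "Category",
--     "cuisine": "Cuisine",
--     "recipeCardIngredients": "Recipe Card Ingredients",
--     "recipeCardInstructions": "Recipe Card Instructions",
--     "nutrition": "Nutrition",
--     "sourceUrl": "Source URL",
-- }
--
-- def build_csv_row(fields):
--     """Convert parsed fields dict to an ordered list matching CSV_HEADER."""
--     row = []
--     for col in CSV_HEADER:
--         # Find the md field name that maps to this CSV column
--         md_key = None
--         for k, v in FIELD_MAP.items():
--             if v == col:
--                 md_key = k
--                 break
--         value = fields.get(md_key, "") if md_key else ""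
--         row.append(value)
--     return row
-- ===== SOURCE B (Python) =====
-- MD_KEYS = [
--     "title", "slug", "createdDate", "updatedDate", "shortDescription",
--     "introduction", "whyYoullLove", "tips", "ingredientsOverview",
--     "instructionsOverview", "faq", "relatedRecipes", "author", "prepTime",
--     "cookTime", "totalTime", "servings", "calories", "diet", "category",
--     "cuisine", "recipeCardIngredients", "recipeCardInstructions",
--     "nutrition", "sourceUrl",
-- ]
--
-- COLUMN_INDEX = {k: i for i, k in enumerate(MD_KEYS)}
--
-- def build_csv_row(fields):
--     """Scatter pass: one walk over fields, dropping each value into its column slot."""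
--     row = [""] * len(MD_KEYS)
--     for key, value in fields.items():
--         i = COLUMN_INDEX.get(key)
--         if i is not None:
--             row[i] = value
--     return row
-- ===== Notes on version B (the rewrite author's own statement) =====
-- stated objective: alternative
-- what changed: B replaces A's per-column gather (for each CSV_HEADER column, scan FIELD_MAP for the matching key and then look it up in fields) by a single scatter pass over fields that drops each value into its column slot via a precomputed key-to-index map; Pre_ requires distinct keys, which every Python dict input satisfies.
import Mathlib
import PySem

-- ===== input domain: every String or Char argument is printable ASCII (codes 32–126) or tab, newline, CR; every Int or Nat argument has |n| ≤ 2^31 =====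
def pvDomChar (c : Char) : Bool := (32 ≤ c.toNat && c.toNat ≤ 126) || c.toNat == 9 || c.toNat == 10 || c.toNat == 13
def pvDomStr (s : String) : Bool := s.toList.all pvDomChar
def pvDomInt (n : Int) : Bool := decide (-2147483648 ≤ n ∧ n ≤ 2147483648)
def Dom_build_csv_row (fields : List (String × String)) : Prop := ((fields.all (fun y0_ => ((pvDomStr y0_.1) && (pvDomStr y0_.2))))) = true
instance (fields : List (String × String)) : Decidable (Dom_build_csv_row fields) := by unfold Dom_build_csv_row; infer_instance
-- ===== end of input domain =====

-- B replaces A's per-column gather (scan FIELD_MAP for each CSV_HEADER column, then look the key up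
-- in fields) by a single scatter pass over fields into a pre-sized row via a key → column-index map;
-- objective: alternative (single pass over fields instead of 25 scans of it).

-- ===== PORT A =====
def CSV_HEADER : List String := ["Name", "Slug", "Created Date", "Updated Date", "Short Description", "Introduction", "Why You'll Love This", "Tips", "Ingredients Overview", "Instructions Overview", "FAQ", "Related Recipes", "Author", "Prep Time", "Cook Time", "Total Time", "Servings", "Calories", "Diet", "Category", "Cuisine", "Recipe Card Ingredients", "Recipe Card Instructions", "Nutrition", "Source URL"]

def FIELD_MAP : List (String × String) := [("title", "Name"), ("slug", "Slug"), ("createdDate", "Created Date"), ("updatedDate", "Updated Date"), ("shortDescription", "Short Description"), ("introduction", "Introduction"), ("whyYoullLove", "Why You'll Love This"), ("tips", "Tips"), ("ingredientsOverview", "Ingredients Overview"), ("instructionsOverview", "Instructions Overview"), ("faq", "FAQ"), ("relatedRecipes", "Related Recipes"), ("author", "Author"), ("prepTime", "Prep Time"), ("cookTime", "Cook Time"), ("totalTime", "Total Time"), ("servings", "Servings"), ("calories", "Calories"), ("diet", "Diet"), ("category", "Category"), ("cuisine", "Cuisine"), ("recipeCardIngredients", "Recipe Card Ingredients"), ("recipeCardInstructions",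 "Recipe Card Instructions"), ("nutrition", "Nutrition"), ("sourceUrl", "Source URL")]

-- fields.get(k, dflt): first-match lookup in the insertion-ordered association list (Python dict)
def dictGetD (fields : List (String × String)) (k : String) (dflt : String) : String :=
  ((fields.find? (fun p => p.1 == k)).map Prod.snd).getD dflt

def build_csv_row (fields : List (String × String)) : List String :=
  CSV_HEADER.foldl (fun row col =>
    -- inner for-loop with break = first (k, v) in FIELD_MAP with v == col
    let md_key : Option String := (FIELD_MAP.find? (fun kv => kv.2 == col)).map Prod.fst
    let value : String := match md_key with
      | some k => dictGetD fields k ""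
      | none => ""
    row ++ [value]) []

-- ===== PORT B =====
def MD_KEYS : List String := ["title", "slug", "createdDate", "updatedDate", "shortDescription", "introduction", "whyYoullLove", "tips", "ingredientsOverview", "instructionsOverview", "faq", "relatedRecipes", "author", "prepTime", "cookTime", "totalTime", "servings", "calories", "diet", "category", "cuisine", "recipeCardIngredients", "recipeCardInstructions", "nutrition", "sourceUrl"]

-- {k: i for i, k in enumerate(MD_KEYS)} as an assoc list (keys are distinct, so the dict is its pair list)
def COLUMN_INDEX : List (String × Int) := (PySem.List.enumerate MD_KEYS 0).map (fun p => (p.2, p.1))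

-- COLUMN_INDEX.get(key): first-match dict lookup
def colIdx (k : String) : Option Int := (COLUMN_INDEX.find? (fun p => p.1 == k)).map Prod.snd

-- loop body: `i = COLUMN_INDEX.get(key); if i is not None: row[i] = value`
def scatterStep (row : List String) (kv : String × String) : List String :=
  match colIdx kv.1 with
  | some i => PySem.List.pySetD row i kv.2   -- row[i] = value; i is always in range 0..24
  | none => row

def build_csv_row_alt (fields : List (String × String)) : List String :=
  fields.foldl scatterStep (List.replicate MD_KEYS.length "")

-- ===== PRECONDITION & SPEC =====
-- fields is a Python dict, whose keys are necessarily unique; Pre_ excludes duplicate-keyed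
-- association lists, which no Python dict produces (first-vs-last occurrence is unspecified there).
def Pre_build_csv_row (fields : List (String × String)) : Prop := (fields.map Prod.fst).Nodup
instance (fields : List (String × String)) : Decidable (Pre_build_csv_row fields) := by unfold Pre_build_csv_row; infer_instance

def pvWitness_build_csv_row : (List (String × String)) := [("title", "Chia Pudding"), ("slug", "chia-pudding"), ("junk", "ignored")]

def Spec_build_csv_row (fields : List (String × String)) (out : List String) : Prop := out = build_csv_row_alt fields
instance (fields : List (String × String)) (out : List String) : Decidable (Spec_build_csv_row fields out) := by unfold Spec_build_csv_row; infer_instance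

-- ===== CLAIM (what is proved, stated in full; the proofs are below) =====
def Claim_equal_build_csv_row : Prop := ∀ (fields : List (String × String)), Dom_build_csv_row fields → Pre_build_csv_row fields → Spec_build_csv_row fields (build_csv_row fields)

-- ===== LEMMAS AND PROOFS =====

lemma colIdx_nonneg (k : String) (i : Int) (h : colIdx k = some i) : 0 ≤ i := by
  unfold colIdx at h
  cases hf : COLUMN_INDEX.find? (fun p => p.1 == k) with
  | none => simp [hf] at h
  | some e =>
    have he : e ∈ COLUMN_INDEX := List.mem_of_find?_eq_some hf
    have hall : ∀ p ∈ COLUMN_INDEX, 0 ≤ p.2 := by decide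
    have := hall e he
    simp [hf] at h
    omega

lemma colIdx_inj (k1 k2 : String) (i : Int) (h1 : colIdx k1 = some i) (h2 : colIdx k2 = some i) : k1 = k2 := by
  unfold colIdx at h1 h2
  cases hf1 : COLUMN_INDEX.find? (fun p => p.1 == k1) with
  | none => simp [hf1] at h1
  | some e1 =>
    cases hf2 : COLUMN_INDEX.find? (fun p => p.1 == k2) with
    | none => simp [hf2] at h2
    | some e2 =>
      have he1 : e1 ∈ COLUMN_INDEX := List.mem_of_find?_eq_some hf1
      have he2 : e2 ∈ COLUMN_INDEX := List.mem_of_find?_eq_some hf2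
      have hp1 : e1.1 = k1 := by simpa using List.find?_some hf1
      have hp2 : e2.1 = k2 := by simpa using List.find?_some hf2
      have hnd : (COLUMN_INDEX.map Prod.snd).Nodup := by decide
      have hsnd : e1.2 = e2.2 := by
        simp [hf1] at h1; simp [hf2] at h2; omega
      have : e1 = e2 := List.inj_on_of_nodup_map hnd he1 he2 hsnd
      rw [← hp1, ← hp2, this]

lemma scatter_length (fs : List (String × String)) : ∀ row : List String,
    (fs.foldl scatterStep row).length = row.length := by
  induction fs with
  | nil => intro row; rfl
  | cons hd tl ih =>
    intro row
    have hstep : (scatterStep row hd).length = row.length := by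
      unfold scatterStep
      cases colIdx hd.1 <;> simp [PySem.List.length_pySetD]
    simpa [List.foldl, hstep] using ih (scatterStep row hd)

lemma scatter_getElem? (fs : List (String × String)) : ∀ (row : List String) (n : Nat),
    (fs.map Prod.fst).Nodup → n < row.length →
    (fs.foldl scatterStep row)[n]? =
      (match fs.find? (fun kv => colIdx kv.1 == some (n : Int)) with
       | some kv => some kv.2
       | none => row[n]?) := by
  induction fs with
  | nil => intro row n _ _; rfl
  | cons hd tl ih =>
    intro row n hnd hn
    have hnd' : (tl.map Prod.fst).Nodup := (List.nodup_cons.mp (by simpa using hnd)).2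
    have hmem : hd.1 ∉ tl.map Prod.fst := (List.nodup_cons.mp (by simpa using hnd)).1
    have hlen : (scatterStep row hd).length = row.length := by
      unfold scatterStep
      cases colIdx hd.1 <;> simp [PySem.List.length_pySetD]
    have hfold : ((hd :: tl).foldl scatterStep row) = tl.foldl scatterStep (scatterStep row hd) := rfl
    rw [hfold, ih (scatterStep row hd) n hnd' (by rw [hlen]; exact hn), List.find?_cons]
    by_cases hp : colIdx hd.1 = some (n : Int)
    · -- hd writes slot n; no later entry can (its key would equal hd.1)
      have hnone : tl.find? (fun kv => colIdx kv.1 == some (n : Int)) = none := by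
        apply List.find?_eq_none.mpr
        intro x hx hpx
        have : x.1 = hd.1 := colIdx_inj x.1 hd.1 n (by simpa using hpx) hp
        exact hmem (this ▸ List.mem_map_of_mem hx)
      have hset : (scatterStep row hd)[n]? = some hd.2 := by
        unfold scatterStep
        rw [hp]
        show (PySem.List.pySetD row (n : Int) hd.2)[n]? = some hd.2
        rw [PySem.List.pySetD_natCast]
        simp [List.getElem?_set_self', List.getElem?_eq_getElem hn]
      simp [hnone, hp, hset]
    · have hkeep : (scatterStep row hd)[n]? = row[n]? := by
        unfold scatterStep
        cases hci : colIdx hd.1 with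
        | none => rfl
        | some i =>
          have hpos : 0 ≤ i := colIdx_nonneg hd.1 i hci
          have hne : i.toNat ≠ n := by
            intro he; exact hp (by rw [hci]; congr 1; omega)
          show (PySem.List.pySetD row i hd.2)[n]? = row[n]?
          rw [PySem.List.pySetD_of_nonneg row hd.2 hpos, List.getElem?_set_ne hne]
      have hpb : (colIdx hd.1 == some (n : Int)) = false := by
        simpa using hp
      rw [hpb]
      cases h2 : tl.find? (fun kv => colIdx kv.1 == some (n : Int)) <;> simp [hkeep]

-- first-match index lookup vs key equality, for any assoc list with distinct keys and distinct indices
lemma find?_idx_key (L : List (String × Int)) (hf : (L.map Prod.fst).Nodup) (hs : (L.map Prod.snd).Nodup)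
    (kj : String) (j : Int) (hm : (kj, j) ∈ L) (k : String) :
    ((L.find? (fun p => p.1 == k)).map Prod.snd == some j) = (k == kj) := by
  by_cases hk : k = kj
  · subst hk
    cases hfind : L.find? (fun p => p.1 == k) with
    | none =>
      exfalso
      have := List.find?_eq_none.mp hfind (k, j) hm
      simp at this
    | some e =>
      have he : e ∈ L := List.mem_of_find?_eq_some hfind
      have hp : e.1 = k := by simpa using List.find?_some hfind
      have : e = (k, j) := List.inj_on_of_nodup_map hf he hm (by simpa using hp)
      simp [this]
  · cases hfind : L.find? (fun p => p.1 == k) with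
    | none => simp [hk]
    | some e =>
      have he : e ∈ L := List.mem_of_find?_eq_some hfind
      have hp : e.1 = k := by simpa using List.find?_some hfind
      have hne : e.2 ≠ j := by
        intro he2
        have : e = (kj, j) := List.inj_on_of_nodup_map hs he hm (by simpa using he2)
        exact hk (by rw [← hp, this])
      simp [hne, hk]

lemma mem_colindex : ∀ (n : Nat) (h : n < 25),
    ((MD_KEYS[n]'(by simp [MD_KEYS]; omega) : String), (n : Int)) ∈ COLUMN_INDEX := by decide

-- ===== VERDICT (by name: the statement is the Claim_ definition above) =====
theorem build_csv_row_spec : Claim_equal_build_csv_row := by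
  intro fields _ hpre
  unfold Spec_build_csv_row
  have hA : build_csv_row fields = MD_KEYS.map (fun k => dictGetD fields k "") := by
    simp [build_csv_row, CSV_HEADER, FIELD_MAP, MD_KEYS, List.foldl, List.find?, List.map]
  rw [hA]
  apply List.ext_getElem?
  intro n
  by_cases hn : n < 25
  · have hlt : n < MD_KEYS.length := by simp [MD_KEYS]; omega
    rw [List.getElem?_map, List.getElem?_eq_getElem hlt]
    unfold build_csv_row_alt
    rw [scatter_getElem? fields _ n hpre (by simp [MD_KEYS]; omega)]
    rw [show (fun kv : String × String => colIdx kv.1 == some (n : Int)) =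
          (fun kv : String × String => kv.1 == MD_KEYS[n]'hlt) from
      funext (fun kv =>
        find?_idx_key COLUMN_INDEX (by decide) (by decide) (MD_KEYS[n]'hlt) n (mem_colindex n hn) kv.1)]
    simp only [Option.map_some]
    cases hfind : fields.find? (fun kv => kv.1 == MD_KEYS[n]'hlt) with
    | none =>
      simp only [dictGetD]
      rw [hfind]
      simp [hlt]
    | some kv =>
      simp only [dictGetD]
      rw [hfind]
      simp
  · have h1 : (MD_KEYS.map (fun k => dictGetD fields k ""))[n]? = none := by
      apply List.getElem?_eq_none
      simp [MD_KEYS]; omega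
    have h2 : (build_csv_row_alt fields)[n]? = none := by
      apply List.getElem?_eq_none
      unfold build_csv_row_alt
      rw [scatter_length]
      simp [MD_KEYS]; omega
    rw [h1, h2]
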